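-- pv_equiv track=rewrite | github.com/Jollyhrothgar/banjo_liberation | flask_app/bl/banjo.py | render_ascii_measures
-- ===== SOURCE A (Python) =====
-- def render_ascii_measures(measures):
--   "Takes measures and converts to ascii tab"
--   lines = [
--     ''.join([m[0] for m in measures]),
--     ''.join([m[1] for m in measures]),
--     ''.join([m[2] for m in measures]),
--     ''.join([m[3] for m in measures]),
--     ''.join([m[4] for m in measures]),
--   ]
--
--   lines = [line + '|' for line in lines]
--
--   return '\n'.join(lines)
-- ===== SOURCE B (Python) =====
-- def render_ascii_measures(measures):
--   "Takes measures and converts to ascii tab"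
--   l0, l1, l2, l3, l4 = _render_from(measures)
--   return l0 + '|\n' + l1 + '|\n' + l2 + '|\n' + l3 + '|\n' + l4 + '|'
--
-- def _render_from(ms):
--   "Render the suffix ms back-to-front: prepend the head measure to the rendered tail."
--   if not ms:
--     return ('', '', '', '', '')
--   m = ms[0]
--   t0, t1, t2, t3, t4 = _render_from(ms[1:])
--   return (m[0] + t0, m[1] + t1, m[2] + t2, m[3] + t3, m[4] + t4)
-- ===== Notes on version B (the rewrite author's own statement) =====
-- stated objective: alternative
-- what changed: B renders recursively back-to-front: the rendered tail's five lines are computed first and each head measure's cells are prepended to them, with the final string assembled by explicit concatenation, instead of A's five independent forward comprehension scans joined by join().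
import Mathlib
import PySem

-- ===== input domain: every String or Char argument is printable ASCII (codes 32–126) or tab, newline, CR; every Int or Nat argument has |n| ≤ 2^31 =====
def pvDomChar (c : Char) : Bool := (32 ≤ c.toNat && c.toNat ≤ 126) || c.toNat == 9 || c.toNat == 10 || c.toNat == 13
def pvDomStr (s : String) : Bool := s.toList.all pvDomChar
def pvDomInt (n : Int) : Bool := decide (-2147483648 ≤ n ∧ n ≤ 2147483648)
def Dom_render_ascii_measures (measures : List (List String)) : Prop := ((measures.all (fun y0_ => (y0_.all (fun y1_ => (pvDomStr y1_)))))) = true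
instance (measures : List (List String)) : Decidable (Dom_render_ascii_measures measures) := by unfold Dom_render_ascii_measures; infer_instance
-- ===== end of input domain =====

-- B renders recursively back-to-front (prepend the head measure's cells to the rendered
-- tail's five lines) instead of A's five independent comprehension scans; alternative decomposition.


-- ===== PORT A =====
-- m[i] is ported as PySem.List.pyGetD m i ""; Pre_ restricts to rows of length ≥ 5,
-- exactly where Python's m[0..4] do not raise IndexError.
def render_ascii_measures (measures : List (List String)) : String :=
  let lines : List String := [
    PySem.Str.join "" (measures.map (fun m => PySem.List.pyGetD m 0 "")),
    PySem.Str.join "" (measures.map (fun m => PySem.List.pyGetD m 1 "")),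
    PySem.Str.join "" (measures.map (fun m => PySem.List.pyGetD m 2 "")),
    PySem.Str.join "" (measures.map (fun m => PySem.List.pyGetD m 3 "")),
    PySem.Str.join "" (measures.map (fun m => PySem.List.pyGetD m 4 ""))]
  let lines := lines.map (fun line => line ++ "|")
  PySem.Str.join "\n" lines

-- ===== PORT B =====
-- _render_from: structural recursion, prepending the head's cells to the rendered tail
def pvRenderFrom (ms : List (List String)) : String × String × String × String × String :=
  match ms with
  | [] => ("", "", "", "", "")
  | m :: rest =>
    let t := pvRenderFrom rest
    (PySem.List.pyGetD m 0 "" ++ t.1,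
     PySem.List.pyGetD m 1 "" ++ t.2.1,
     PySem.List.pyGetD m 2 "" ++ t.2.2.1,
     PySem.List.pyGetD m 3 "" ++ t.2.2.2.1,
     PySem.List.pyGetD m 4 "" ++ t.2.2.2.2)

def render_ascii_measures_alt (measures : List (List String)) : String :=
  let l := pvRenderFrom measures
  l.1 ++ "|\n" ++ l.2.1 ++ "|\n" ++ l.2.2.1 ++ "|\n" ++ l.2.2.2.1 ++ "|\n" ++ l.2.2.2.2 ++ "|"

-- ===== PRECONDITION & SPEC =====
-- Pre_ excludes exactly the inputs where Python A raises IndexError (some row shorter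
-- than 5); Python B raises there as well.
def Pre_render_ascii_measures (measures : List (List String)) : Prop :=
  ∀ m ∈ measures, 5 ≤ m.length
instance (measures : List (List String)) : Decidable (Pre_render_ascii_measures measures) := by
  unfold Pre_render_ascii_measures; infer_instance
def pvWitness_render_ascii_measures : List (List String) :=
  [["x", "-", "0", "-", "-"], ["-", "2", "-", "-", "h"]]

def Spec_render_ascii_measures (measures : List (List String)) (out : String) : Prop := out = render_ascii_measures_alt measures
instance (measures : List (List String)) (out : String) : Decidable (Spec_render_ascii_measures measures out) := by unfold Spec_render_ascii_measures; infer_instance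

-- ===== CLAIM (what is proved, stated in full; the proofs are below) =====
def Claim_equal_render_ascii_measures : Prop := ∀ (measures : List (List String)), Dom_render_ascii_measures measures → Pre_render_ascii_measures measures → Spec_render_ascii_measures measures (render_ascii_measures measures)

-- ===== LEMMAS AND PROOFS =====

theorem pvFlatten_intersperse_nil (l : List (List Char)) :
    (List.intersperse ([] : List Char) l).flatten = l.flatten := by
  induction l with
  | nil => simp
  | cons x xs ih =>
    cases xs with
    | nil => simp
    | cons y ys => simpa [List.intersperse] using ih

theorem pvJoin_empty_cons (x : String) (xs : List String) :
    PySem.Str.join "" (x :: xs) = x ++ PySem.Str.join "" xs := by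
  simp only [PySem.Str.join, PySem.Chars.join, List.intercalate, String.toList_empty,
    List.map_cons, pvFlatten_intersperse_nil, List.flatten_cons, String.ofList_append,
    String.ofList_toList]

theorem pvRenderFrom_eq (measures : List (List String)) :
    pvRenderFrom measures =
      (PySem.Str.join "" (measures.map (fun m => PySem.List.pyGetD m 0 "")),
       PySem.Str.join "" (measures.map (fun m => PySem.List.pyGetD m 1 "")),
       PySem.Str.join "" (measures.map (fun m => PySem.List.pyGetD m 2 "")),
       PySem.Str.join "" (measures.map (fun m => PySem.List.pyGetD m 3 "")),
       PySem.Str.join "" (measures.map (fun m => PySem.List.pyGetD m 4 ""))) := by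
  induction measures with
  | nil => simp [pvRenderFrom, PySem.Str.join, PySem.Chars.join, List.intercalate]
  | cons m ms ih => simp only [pvRenderFrom, ih, List.map_cons, pvJoin_empty_cons]

theorem pvJoin_nl5 (a b c d e : String) :
    PySem.Str.join "\n" [a, b, c, d, e] =
      a ++ "\n" ++ b ++ "\n" ++ c ++ "\n" ++ d ++ "\n" ++ e := by
  apply String.toList_inj.mp
  simp [PySem.Str.join, PySem.Chars.join, List.intercalate, List.intersperse]

-- ===== VERDICT (by name: the statement is the Claim_ definition above) =====
theorem render_ascii_measures_spec : Claim_equal_render_ascii_measures := by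
  intro measures _ _
  unfold Spec_render_ascii_measures render_ascii_measures render_ascii_measures_alt
  rw [pvRenderFrom_eq]
  simp only [List.map_cons, List.map_nil, pvJoin_nl5]
  apply String.toList_inj.mp
  simp
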